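-- pv_equiv track=rewrite | github.com/wndlthsk/algorithm-study | week15/14620/14620_조승빈.py | is_available
-- ===== SOURCE A (Python) =====
-- dx = [0, 0, 0, 1, -1]
--
-- dy = [0, 1, -1, 0, 0]
--
-- def get_positions(x, y):
--     positions = []
--     for i in range(5):
--         positions.append((x + dx[i], y + dy[i]))
--
--     return positions
--
-- def is_available(pos_list):
--     visited = set()
--     for x, y in pos_list:
--         for px, py in get_positions(x, y):
--             if (px, py) in visited:
--                 return False
--             visited.add((px, py))
--     return True
-- ===== SOURCE B (Python) =====
-- def is_available(pos_list):
--     # Two plus shapes overlap iff their centers are within Manhattan distance 2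
--     # (the Minkowski difference of the plus with itself is exactly the L1 ball of radius 2).
--     if not pos_list:
--         return True
--     (x1, y1), rest = pos_list[0], pos_list[1:]
--     return all(abs(x1 - x2) + abs(y1 - y2) > 2 for x2, y2 in rest) and is_available(rest)
-- ===== Notes on version B (the rewrite author's own statement) =====
-- stated objective: alternative
-- what changed: B replaces A's cell-materialization with a visited set by a geometric pairwise test: two plus shapes collide iff their centers are within Manhattan distance 2 (the Minkowski difference of the plus with itself is the L1 ball of radius 2), checked by structural recursion over the list with no sets or cell lists at all.
import Mathlib
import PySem

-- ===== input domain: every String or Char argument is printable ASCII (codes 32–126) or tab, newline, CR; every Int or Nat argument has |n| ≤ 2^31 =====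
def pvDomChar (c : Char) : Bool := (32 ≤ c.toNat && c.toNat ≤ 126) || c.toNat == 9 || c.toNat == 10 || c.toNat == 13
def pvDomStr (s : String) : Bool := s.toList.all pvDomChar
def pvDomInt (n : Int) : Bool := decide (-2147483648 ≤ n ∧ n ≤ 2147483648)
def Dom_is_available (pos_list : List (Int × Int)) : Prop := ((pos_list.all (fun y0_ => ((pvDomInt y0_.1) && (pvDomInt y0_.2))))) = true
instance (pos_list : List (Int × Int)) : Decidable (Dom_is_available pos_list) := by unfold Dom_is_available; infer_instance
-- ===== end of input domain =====

-- B drops A's visited-set of materialized plus-cells for a geometric pairwise test: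
-- two plus shapes collide iff their centers are within Manhattan distance 2 (objective: alternative).

-- ===== PORT A =====
def dxA : List Int := [0, 0, 0, 1, -1]

def dyA : List Int := [0, 1, -1, 0, 0]

-- for i in range(5): positions.append((x + dx[i], y + dy[i]))
-- (dx[i]/dy[i] via pyGet?; always some since 0 ≤ i < 5 = len(dx), so .getD 0 is exact)
def get_positions (x y : Int) : List (Int × Int) :=
  (PySem.List.pyRange 0 5 1).foldl
    (fun positions i =>
      positions ++ [((x + (PySem.List.pyGet? dxA i).getD 0, y + (PySem.List.pyGet? dyA i).getD 0))]) []

-- inner 'for px, py in get_positions(x, y)' loop; none = the early 'return False'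
def innerA : List (Int × Int) → PySem.Set (Int × Int) → Option (PySem.Set (Int × Int))
  | [], visited => some visited
  | p :: ps, visited =>
    if PySem.Set.contains visited p then none
    else innerA ps (PySem.Set.add visited p)

-- outer 'for x, y in pos_list' loop
def outerA : List (Int × Int) → PySem.Set (Int × Int) → Bool
  | [], _ => true
  | (x, y) :: rest, visited =>
    match innerA (get_positions x y) visited with
    | none => false
    | some v => outerA rest v

def is_available (pos_list : List (Int × Int)) : Bool :=
  outerA pos_list PySem.Set.empty

-- ===== PORT B =====
-- if not pos_list: return True
-- (x1, y1), rest = pos_list[0], pos_list[1:]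
-- return all(abs(x1-x2)+abs(y1-y2) > 2 for x2, y2 in rest) and is_available(rest)
def is_available_alt : List (Int × Int) → Bool
  | [] => true
  | (x1, y1) :: rest =>
    (rest.all (fun q => decide (2 < |x1 - q.1| + |y1 - q.2|))) && is_available_alt rest

-- ===== PRECONDITION & SPEC =====
def Spec_is_available (pos_list : List (Int × Int)) (out : Bool) : Prop := out = is_available_alt pos_list
instance (pos_list : List (Int × Int)) (out : Bool) : Decidable (Spec_is_available pos_list out) := by unfold Spec_is_available; infer_instance

-- ===== CLAIM (what is proved, stated in full; the proofs are below) =====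
def Claim_equal_is_available : Prop := ∀ (pos_list : List (Int × Int)), Dom_is_available pos_list → Spec_is_available pos_list (is_available pos_list)

-- ===== LEMMAS AND PROOFS =====

def offsetsL : List (Int × Int) := [(0, 0), (0, 1), (0, -1), (1, 0), (-1, 0)]

def cellsOf (l : List (Int × Int)) : List (Int × Int) :=
  l.flatMap (fun xy => offsetsL.map (fun d => (xy.1 + d.1, xy.2 + d.2)))

-- get_positions evaluated: the five plus-cells of a center
theorem get_positions_eq (x y : Int) :
    get_positions x y = offsetsL.map (fun d => (x + d.1, y + d.2)) := by
  simp [get_positions, offsetsL, show PySem.List.pyRange 0 5 1 = [0,1,2,3,4] from by decide,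
        PySem.List.pyGet?, dxA, dyA, PySem.List.pyIdx?]

-- innerA succeeds iff the positions are fresh and pairwise distinct; then visited = v ++ ps
theorem innerA_eq (ps : List (Int × Int)) (v : PySem.Set (Int × Int)) :
    innerA ps v = if ps.Nodup ∧ ∀ p ∈ ps, p ∉ v then some (v ++ ps) else none := by
  induction ps generalizing v with
  | nil => simp [innerA]
  | cons p ps ih =>
    show (if PySem.Set.contains v p then none else innerA ps (PySem.Set.add v p)) = _
    by_cases hp : p ∈ v
    · rw [if_pos ((PySem.Set.contains_iff v p).2 hp), if_neg]
      rintro ⟨-, h⟩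
      exact h p (by simp) hp
    · have hc : PySem.Set.contains v p = false := by
        rcases Bool.eq_false_or_eq_true (PySem.Set.contains v p) with h | h
        · exact absurd ((PySem.Set.contains_iff v p).1 h) hp
        · exact h
      rw [hc, if_neg (by simp), PySem.Set.add_of_not_mem hp, ih]
      have hiff : (ps.Nodup ∧ ∀ q ∈ ps, q ∉ v ++ [p]) ↔
          ((p :: ps).Nodup ∧ ∀ q ∈ p :: ps, q ∉ v) := by
        simp only [List.nodup_cons, List.mem_append, List.mem_cons, not_or]
        constructor
        · rintro ⟨hnd, hall⟩
          refine ⟨⟨fun hm => (hall p hm).2.1 rfl, hnd⟩, ?_⟩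
          rintro q (rfl | hq)
          · exact hp
          · exact (hall q hq).1
        · rintro ⟨⟨hpn, hnd⟩, hall⟩
          refine ⟨hnd, fun q hq => ⟨hall q (Or.inr hq), fun h => hpn (by rw [← h]; exact hq),
            fun h => (List.not_mem_nil h)⟩⟩
      have hval : v ++ [p] ++ ps = v ++ p :: ps := by simp
      rw [hval]
      exact if_congr hiff rfl rfl

theorem outerA_eq (l : List (Int × Int)) (v : PySem.Set (Int × Int)) :
    outerA l v = decide ((cellsOf l).Nodup ∧ ∀ c ∈ cellsOf l, c ∉ v) := by
  induction l generalizing v with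
  | nil => simp [outerA, cellsOf]
  | cons xy rest ih =>
    obtain ⟨x, y⟩ := xy
    have hc : cellsOf ((x, y) :: rest) = get_positions x y ++ cellsOf rest := by
      simp [cellsOf, get_positions_eq]
    rw [hc]
    show (match innerA (get_positions x y) v with
          | none => false
          | some w => outerA rest w) = _
    rw [innerA_eq]
    by_cases h1 : (get_positions x y).Nodup ∧ ∀ p ∈ get_positions x y, p ∉ v
    · rw [if_pos h1]
      show outerA rest (v ++ get_positions x y) = _
      rw [ih, decide_eq_decide]
      constructor
      · rintro ⟨hn, hall⟩
        have hdisj : ∀ a ∈ get_positions x y, ∀ b ∈ cellsOf rest, a ≠ b := by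
          intro a ha b hb rfl_eq
          exact hall b hb (by simp [rfl_eq ▸ ha])
        refine ⟨List.nodup_append.2 ⟨h1.1, hn, hdisj⟩, ?_⟩
        intro c hcm hv
        rcases List.mem_append.1 hcm with hcp | hcr
        · exact h1.2 c hcp hv
        · exact hall c hcr (by simp [hv])
      · rintro ⟨hn, hall⟩
        have hna := List.nodup_append.1 hn
        refine ⟨hna.2.1, ?_⟩
        intro c hcr hcv
        rcases List.mem_append.1 hcv with hv | hcp
        · exact hall c (List.mem_append.2 (Or.inr hcr)) hv
        · exact hna.2.2 c hcp c hcr rfl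
    · rw [if_neg h1]
      show false = _
      symm
      rw [decide_eq_false_iff_not]
      rintro ⟨hn, hall⟩
      exact h1 ⟨(List.nodup_append.1 hn).1,
        fun p hpm hv => hall p (List.mem_append.2 (Or.inl hpm)) hv⟩

-- each plus has five distinct cells
theorem block_nodup (xy : Int × Int) :
    (offsetsL.map (fun d => (xy.1 + d.1, xy.2 + d.2))).Nodup := by
  simp [offsetsL, Prod.ext_iff]

-- geometry: the cells of two pluses share a point iff the centers are within L1 distance 2
theorem overlap_iff (p q : Int × Int) :
    (∃ c, c ∈ (offsetsL.map (fun d => (p.1 + d.1, p.2 + d.2))) ∧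
          c ∈ (offsetsL.map (fun d => (q.1 + d.1, q.2 + d.2)))) ↔
    |p.1 - q.1| + |p.2 - q.2| ≤ 2 := by
  rw [Int.abs_eq_natAbs, Int.abs_eq_natAbs]
  constructor
  · rintro ⟨c, hc1, hc2⟩
    simp [offsetsL, Prod.ext_iff] at hc1 hc2
    omega
  · intro hle
    set d1 : Int := p.1 - q.1 with hd1
    set d2 : Int := p.2 - q.2 with hd2
    have hb1 : -2 ≤ d1 ∧ d1 ≤ 2 := by omega
    have hb2 : -2 ≤ d2 ∧ d2 ≤ 2 := by omega
    obtain ⟨hb1a, hb1b⟩ := hb1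
    obtain ⟨hb2a, hb2b⟩ := hb2
    interval_cases d1 <;> interval_cases d2 <;>
      first
      | exact absurd hle (by omega)
      | exact ⟨(q.1 + 0, q.2 + 0), by simp [offsetsL, Prod.ext_iff]; omega,
          by simp [offsetsL]⟩
      | exact ⟨(q.1 + 0, q.2 + 1), by simp [offsetsL, Prod.ext_iff]; omega,
          by simp [offsetsL]⟩
      | exact ⟨(q.1 + 0, q.2 + -1), by simp [offsetsL, Prod.ext_iff]; omega,
          by simp [offsetsL]⟩
      | exact ⟨(q.1 + 1, q.2 + 0), by simp [offsetsL, Prod.ext_iff]; omega,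
          by simp [offsetsL]⟩
      | exact ⟨(q.1 + -1, q.2 + 0), by simp [offsetsL, Prod.ext_iff]; omega,
          by simp [offsetsL]⟩

-- hence: cell-disjoint iff farther than 2
theorem disjoint_iff_far (p q : Int × Int) :
    (offsetsL.map (fun d => (p.1 + d.1, p.2 + d.2))).Disjoint
      (offsetsL.map (fun d => (q.1 + d.1, q.2 + d.2))) ↔
    2 < |p.1 - q.1| + |p.2 - q.2| := by
  constructor
  · intro hd
    by_contra h
    obtain ⟨c, h1, h2⟩ := (overlap_iff p q).2 (not_lt.1 h)
    exact hd h1 h2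
  · intro hf c h1 h2
    exact absurd ((overlap_iff p q).1 ⟨c, h1, h2⟩) (not_le.2 hf)

-- B unfolded: pairwise "centers farther than 2"
theorem alt_eq (l : List (Int × Int)) :
    is_available_alt l = decide (l.Pairwise (fun p q => 2 < |p.1 - q.1| + |p.2 - q.2|)) := by
  induction l with
  | nil => simp [is_available_alt]
  | cons p rest ih =>
    obtain ⟨x1, y1⟩ := p
    show (rest.all _ && is_available_alt rest) = _
    have hall : (rest.all fun q => decide (2 < |x1 - q.1| + |y1 - q.2|)) =
        decide (∀ q ∈ rest, 2 < |x1 - q.1| + |y1 - q.2|) := by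
      by_cases h : ∀ q ∈ rest, 2 < |x1 - q.1| + |y1 - q.2|
      · rw [decide_eq_true h, List.all_eq_true.2 fun q hq => decide_eq_true (h q hq)]
      · rw [decide_eq_false h]
        push Not at h
        obtain ⟨q, hq, hle⟩ := h
        exact List.all_eq_false.2 ⟨q, hq, by simpa using hle⟩
    rw [ih, hall, ← Bool.decide_and, decide_eq_decide, List.pairwise_cons]

-- ===== VERDICT (by name: the statement is the Claim_ definition above) =====
theorem is_available_spec : Claim_equal_is_available := by
  intro pos_list _
  unfold Spec_is_available is_available
  rw [outerA_eq, alt_eq, decide_eq_decide]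
  have hmem : ∀ c : Int × Int, c ∉ (PySem.Set.empty : PySem.Set (Int × Int)) := by
    intro c h
    exact List.not_mem_nil (show c ∈ ([] : List (Int × Int)) from h)
  constructor
  · rintro ⟨hn, -⟩
    rw [cellsOf, List.nodup_flatMap] at hn
    exact hn.2.imp fun {a b} hd => (disjoint_iff_far a b).1 hd
  · intro hpw
    refine ⟨?_, fun c _ => hmem c⟩
    rw [cellsOf, List.nodup_flatMap]
    exact ⟨fun xy _ => block_nodup xy, hpw.imp fun {a b} h => (disjoint_iff_far a b).2 h⟩
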